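-- pv_equiv track=rewrite | github.com/wuyifannppp/poco-agent | executor_manager/app/services/config_resolver.py | _extract_enabled_ids_from_toggles
-- ===== SOURCE A (Python) =====
-- from typing import Any
--
-- def _extract_enabled_ids_from_toggles(value: Any) -> list[int] | None:
--     """Convert {id: bool} toggles into enabled id list.
--
--     Returns None when the value does not look like toggles.
--     """
--     if not isinstance(value, dict):
--         return None
--     if not value:
--         return []
--     ids: list[int] = []
--     seen: set[int] = set()
--     for key, enabled in value.items():
--         if not isinstance(enabled, bool):
--             return None
--         if enabled is not True:
--             continue
--         if not isinstance(key, str):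
--             return None
--         key = key.strip()
--         if not key:
--             continue
--         try:
--             sid = int(key)
--         except ValueError:
--             return None
--         if sid in seen:
--             continue
--         seen.add(sid)
--         ids.append(sid)
--     return ids
-- ===== SOURCE B (Python) =====
-- def _extract_enabled_ids_from_toggles(value):
--     """Convert {id: bool} toggles into enabled id list (divide-and-conquer version)."""
--     if not isinstance(value, dict):
--         return None
--     return _collect(list(value.items()))
--
-- def _collect(items):
--     """Enabled ids of items in first-occurrence order, or None on any bad entry."""
--     if len(items) <= 1:
--         if not items:
--             return []
--         key, enabled = items[0]
--         if not isinstance(enabled, bool):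
--             return None
--         if enabled is not True:
--             return []
--         if not isinstance(key, str):
--             return None
--         k = key.strip()
--         if not k:
--             return []
--         try:
--             return [int(k)]
--         except ValueError:
--             return None
--     mid = len(items) // 2
--     left = _collect(items[:mid])
--     if left is None:
--         return None
--     right = _collect(items[mid:])
--     if right is None:
--         return None
--     seen = set(left)
--     return left + [x for x in right if x not in seen]
-- ===== Notes on version B (the rewrite author's own statement) =====
-- stated objective: alternative
-- what changed: A's single forward loop with a mutable seen-set accumulator is replaced by divide and conquer: the items are split in half, each half is collected recursively, and the two partial results are merged by appending the right half's ids not already present on the left, so first-occurrence dedup arises from the merge instead of seen-set bookkeeping.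
import Mathlib
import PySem

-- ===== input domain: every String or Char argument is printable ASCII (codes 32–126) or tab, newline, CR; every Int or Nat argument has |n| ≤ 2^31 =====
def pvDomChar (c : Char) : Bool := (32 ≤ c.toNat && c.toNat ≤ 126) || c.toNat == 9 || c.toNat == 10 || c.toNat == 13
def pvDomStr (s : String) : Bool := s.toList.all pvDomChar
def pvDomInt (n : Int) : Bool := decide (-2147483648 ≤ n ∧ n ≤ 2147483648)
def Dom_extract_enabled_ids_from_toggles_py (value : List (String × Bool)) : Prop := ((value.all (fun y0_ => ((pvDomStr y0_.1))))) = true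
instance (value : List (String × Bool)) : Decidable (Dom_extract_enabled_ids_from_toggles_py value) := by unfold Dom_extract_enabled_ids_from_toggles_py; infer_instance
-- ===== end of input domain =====

-- B replaces A's forward loop + mutable seen-set by divide and conquer: collect each half
-- recursively and merge, appending the right ids not already on the left. Alternative, same cost.


-- ===== PORT A =====
-- A's for-loop: state is (ids, seen); `return None` = none.  (In the Lean types the
-- isinstance(enabled, bool) / isinstance(key, str) checks of A hold by typing.)
def pvALoop : List (String × Bool) → List Int → PySem.Set Int → Option (List Int)
  | [], ids, _ => some ids
  | (key, enabled) :: rest, ids, seen =>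
    if ¬ (enabled = true) then pvALoop rest ids seen
    else
      let k := PySem.Str.strip key
      if PySem.Str.len k = 0 then pvALoop rest ids seen
      else
        match PySem.Int.ofStr? k with
        | none => none
        | some sid =>
          if PySem.Set.contains seen sid then pvALoop rest ids seen
          else pvALoop rest (ids ++ [sid]) (PySem.Set.add seen sid)

def extract_enabled_ids_from_toggles_py (value : List (String × Bool)) : Option (List Int) :=
  if value = [] then some []
  else pvALoop value [] PySem.Set.empty

-- ===== PORT B =====
-- Source B's _collect on a ≤1-element list (the divide-and-conquer base case)
def pvBase (key : String) (enabled : Bool) : Option (List Int) :=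
  if ¬ (enabled = true) then some []
  else
    let k := PySem.Str.strip key
    if PySem.Str.len k = 0 then some []
    else
      match PySem.Int.ofStr? k with
      | none => none
      | some sid => some [sid]

-- Source B's _collect: split in half, recurse on both halves, merge with dedup-by-membership
def pvCollect (items : List (String × Bool)) : Option (List Int) :=
  if _h : items.length ≤ 1 then
    match items with
    | [] => some []
    | (key, enabled) :: _ => pvBase key enabled
  else
    let mid := items.length / 2
    match pvCollect (items.take mid) with
    | none => none
    | some left =>
      match pvCollect (items.drop mid) with
      | none => none
      | some right =>
        let seen := PySem.Set.ofList left
        some (left ++ right.filter (fun x => ¬ PySem.Set.contains seen x))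
termination_by items.length
decreasing_by
  · simp only [List.length_take]; omega
  · simp only [List.length_drop]; omega

def extract_enabled_ids_from_toggles_py_alt (value : List (String × Bool)) : Option (List Int) :=
  pvCollect value

-- ===== PRECONDITION & SPEC =====
def Spec_extract_enabled_ids_from_toggles_py (value : List (String × Bool)) (out : Option (List Int)) : Prop := out = extract_enabled_ids_from_toggles_py_alt value
instance (value : List (String × Bool)) (out : Option (List Int)) : Decidable (Spec_extract_enabled_ids_from_toggles_py value out) := by unfold Spec_extract_enabled_ids_from_toggles_py; infer_instance

-- ===== CLAIM =====
def Claim_equal_extract_enabled_ids_from_toggles_py : Prop := ∀ (value : List (String × Bool)), Dom_extract_enabled_ids_from_toggles_py value → Spec_extract_enabled_ids_from_toggles_py value (extract_enabled_ids_from_toggles_py value)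

-- ===== LEMMAS AND PROOFS =====

-- the stripped nonempty keys of the enabled entries, in order
def pvKeys (items : List (String × Bool)) : List String :=
  (((items.filter (fun p => p.2)).map (fun p => p.1)).map PySem.Str.strip).filter
    (fun k => ¬ PySem.Str.len k = 0)

-- parse a key list; none exactly when some key fails int()
def pvParse : List String → Option (List Int)
  | [] => some []
  | k :: ks =>
    match PySem.Int.ofStr? k with
    | none => none
    | some n => (pvParse ks).map (fun xs => n :: xs)

lemma pvKeys_append (a b : List (String × Bool)) :
    pvKeys (a ++ b) = pvKeys a ++ pvKeys b := by
  simp [pvKeys, List.filter_append, List.map_append]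

lemma pvParse_append (a b : List String) :
    pvParse (a ++ b) = (pvParse a).bind (fun xs => (pvParse b).map (fun ys => xs ++ ys)) := by
  induction a with
  | nil =>
    simp only [List.nil_append, pvParse]
    cases pvParse b <;> simp
  | cons k ks ih =>
    simp only [List.cons_append, pvParse, ih]
    cases PySem.Int.ofStr? k with
    | none => simp
    | some n =>
      cases pvParse ks with
      | none => simp
      | some xs => cases pvParse b <;> simp

-- running Python-set insertion from state s = s, then the fresh elements in first-occurrence order
lemma foldl_add_split (bs : List Int) : ∀ s : List Int,
    List.foldl PySem.Set.add s bs =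
      s ++ (List.foldl PySem.Set.add [] bs).filter (fun x => x ∉ s) := by
  induction bs with
  | nil => intro s; simp
  | cons b bs ih =>
    intro s
    have hb : List.foldl PySem.Set.add ([] : List Int) (b :: bs)
        = b :: (List.foldl PySem.Set.add [] bs).filter (fun x => x ≠ b) := by
      show List.foldl PySem.Set.add (PySem.Set.add [] b) bs = _
      rw [show PySem.Set.add ([] : List Int) b = [b] by rfl, ih [b]]
      simp
    rw [List.foldl_cons, ih (PySem.Set.add s b), hb]
    by_cases hc : b ∈ s
    · rw [show PySem.Set.add s b = s by simp [PySem.Set.add, PySem.Set.contains, hc]]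
      simp only [List.filter_cons, List.filter_filter]
      rw [show (decide (b ∉ s)) = false by simp [hc]]
      simp only [List.append_cancel_left_eq]
      apply List.filter_congr
      intro x hx
      by_cases hxs : x ∈ s
      · simp [hxs]
      · simp [hxs]; intro hxe; exact hxs (hxe ▸ hc)
    · rw [show PySem.Set.add s b = s ++ [b] by simp [PySem.Set.add, PySem.Set.contains, hc]]
      simp only [List.filter_cons, List.filter_filter]
      rw [show (decide (b ∉ s)) = true by simp [hc]]
      simp only [if_true, List.append_assoc, List.cons_append, List.nil_append,
        List.append_cancel_left_eq, List.cons.injEq, true_and]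
      apply List.filter_congr
      intro x hx
      by_cases hxi : x ∈ s <;> by_cases hxe : x = b <;> simp [hxi, hxe, hc]

-- the stripped key is "" iff its char list strips to []
lemma pv_strip_nil_iff (key : String) :
    PySem.Chars.strip key.toList = [] ↔ PySem.Str.strip key = "" := by
  rw [← PySem.Str.toList_strip]
  exact String.toList_eq_nil_iff

-- A's loop with seen = ids: parse the remaining keys, then insert them after ids
lemma pvALoop_eq (rest : List (String × Bool)) : ∀ ids : List Int,
    pvALoop rest ids ids =
      (pvParse (pvKeys rest)).map (fun ns => ns.foldl PySem.Set.add ids) := by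
  induction rest with
  | nil => intro ids; simp [pvALoop, pvKeys, pvParse]
  | cons p rest ih =>
    intro ids
    obtain ⟨key, enabled⟩ := p
    cases enabled with
    | false =>
      have hkeys : pvKeys ((key, false) :: rest) = pvKeys rest := by simp [pvKeys]
      rw [show pvALoop ((key, false) :: rest) ids ids = pvALoop rest ids ids by
            simp [pvALoop], hkeys]
      exact ih ids
    | true =>
      by_cases hk : PySem.Chars.strip key.toList = []
      · have hk' : PySem.Str.strip key = "" := (pv_strip_nil_iff key).mp hk
        have hkeys : pvKeys ((key, true) :: rest) = pvKeys rest := by simp [pvKeys, hk']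
        rw [show pvALoop ((key, true) :: rest) ids ids = pvALoop rest ids ids by
              simp [pvALoop, hk], hkeys]
        exact ih ids
      · have hk' : ¬ PySem.Str.strip key = "" := fun h => hk ((pv_strip_nil_iff key).mpr h)
        have hkeys : pvKeys ((key, true) :: rest) = PySem.Str.strip key :: pvKeys rest := by
          simp [pvKeys, hk']
        rw [hkeys]
        cases hv : PySem.Int.ofStr? (PySem.Str.strip key) with
        | none => simp [pvALoop, pvParse, hk, hv]
        | some sid =>
          by_cases hc : sid ∈ ids
          · rw [show pvALoop ((key, true) :: rest) ids ids = pvALoop rest ids ids by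
                  simp [pvALoop, hk, hv, hc], ih ids]
            simp only [pvParse, hv]
            cases pvParse (pvKeys rest) with
            | none => simp
            | some ns =>
              simp only [Option.map_some, Option.some.injEq, List.foldl_cons]
              rw [show PySem.Set.add ids sid = ids by
                    simp [PySem.Set.add, PySem.Set.contains, hc]]
          · rw [show pvALoop ((key, true) :: rest) ids ids
                  = pvALoop rest (ids ++ [sid]) (PySem.Set.add ids sid) by
                  simp [pvALoop, hk, hv, hc],
                show PySem.Set.add ids sid = ids ++ [sid] by
                  simp [PySem.Set.add, PySem.Set.contains, hc],
                ih (ids ++ [sid])]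
            simp only [pvParse, hv]
            cases pvParse (pvKeys rest) with
            | none => simp
            | some ns =>
              simp only [Option.map_some, Option.some.injEq, List.foldl_cons]
              rw [show PySem.Set.add ids sid = ids ++ [sid] by
                    simp [PySem.Set.add, PySem.Set.contains, hc]]

-- unfolding equations for pvCollect
lemma pvCollect_nil : pvCollect [] = some [] := by
  rw [pvCollect.eq_def]; simp

lemma pvCollect_one (key : String) (enabled : Bool) :
    pvCollect [(key, enabled)] = pvBase key enabled := by
  rw [pvCollect.eq_def]; simp

lemma pvCollect_big (items : List (String × Bool)) (h : ¬ items.length ≤ 1) :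
    pvCollect items =
      (match pvCollect (items.take (items.length / 2)) with
       | none => none
       | some left =>
         match pvCollect (items.drop (items.length / 2)) with
         | none => none
         | some right =>
           some (left ++ right.filter
             (fun x => ¬ PySem.Set.contains (PySem.Set.ofList left) x))) := by
  rw [pvCollect.eq_def]; simp [h]

-- the single-item base case matches the parse-then-insert spec
lemma pvCollect_one_eq (key : String) (enabled : Bool) :
    pvCollect [(key, enabled)] =
      (pvParse (pvKeys [(key, enabled)])).map
        (fun ns => ns.foldl PySem.Set.add ([] : List Int)) := by
  rw [pvCollect_one]
  cases enabled with
  | false => simp [pvBase, pvKeys, pvParse]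
  | true =>
    by_cases hk : PySem.Str.strip key = ""
    · have hk2 : PySem.Chars.strip key.toList = [] := (pv_strip_nil_iff key).mpr hk
      simp [pvBase, pvKeys, pvParse, hk]
    · have hk2 : ¬ PySem.Chars.strip key.toList = [] := fun h => hk ((pv_strip_nil_iff key).mp h)
      cases hv : PySem.Int.ofStr? (PySem.Str.strip key) with
      | none => simp [pvBase, pvKeys, pvParse, hk, hk2, hv]
      | some sid => simp [pvBase, pvKeys, pvParse, hk, hk2, hv, PySem.Set.add]

-- B's divide and conquer computes the same parse-then-insert-from-[] value
lemma pvCollect_eq_aux : ∀ (n : Nat) (items : List (String × Bool)), items.length ≤ n →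
    pvCollect items =
      (pvParse (pvKeys items)).map (fun ns => ns.foldl PySem.Set.add ([] : List Int)) := by
  intro n
  induction n with
  | zero =>
    intro items h
    have : items = [] := List.eq_nil_of_length_eq_zero (Nat.le_zero.mp h)
    subst this
    simp [pvCollect_nil, pvKeys, pvParse]
  | succ n ih =>
    intro items hn
    by_cases h : items.length ≤ 1
    · match items with
      | [] => simp [pvCollect_nil, pvKeys, pvParse]
      | [(key, enabled)] => exact pvCollect_one_eq key enabled
      | _ :: _ :: _ => simp at h
    · rw [pvCollect_big items h,
        ih (items.take (items.length / 2)) (by simp; omega),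
        ih (items.drop (items.length / 2)) (by simp; omega)]
      conv_rhs => rw [show items = items.take (items.length / 2) ++ items.drop (items.length / 2) by simp]
      rw [pvKeys_append, pvParse_append]
      cases hpa : pvParse (pvKeys (items.take (items.length / 2))) with
      | none => simp
      | some nsa =>
        cases hpb : pvParse (pvKeys (items.drop (items.length / 2))) with
        | none => simp
        | some nsb =>
          simp only [Option.map_some, Option.bind_some, Option.some.injEq, List.foldl_append]
          rw [foldl_add_split nsb (nsa.foldl PySem.Set.add [])]
          congr 1
          apply List.filter_congr
          intro x hx
          rw [← PySem.Set.ofList_eq_foldl nsa]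
          simp [PySem.Set.contains, PySem.Set.mem_ofList]

-- ===== VERDICT =====
theorem extract_enabled_ids_from_toggles_py_spec : Claim_equal_extract_enabled_ids_from_toggles_py := by
  intro value _
  unfold Spec_extract_enabled_ids_from_toggles_py
  unfold extract_enabled_ids_from_toggles_py extract_enabled_ids_from_toggles_py_alt
  by_cases hv : value = []
  · subst hv
    rw [pvCollect_nil]
    simp
  · rw [if_neg hv,
      show (PySem.Set.empty : PySem.Set Int) = ([] : List Int) from rfl,
      pvALoop_eq value [], pvCollect_eq_aux value.length value le_rfl]
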